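-- pv_equiv track=rewrite | github.com/GH-Lim/AlgorithmPractice | problems/test4/06.py | solution
-- ===== SOURCE A (Python) =====
-- def solution(directory, command):
--     answer = []
--
--     for comm in command:
--         comm = comm.split()
--         if comm[0] == 'mkdir':
--             directory.append(comm[1])
--         elif comm[0] == 'cp':
--             temp = []
--             for dir in directory:
--                 if dir[:len(comm[1])] == comm[1]:
--                     sub_dir = comm[1].split('/')
--                     temp.append(dir[len(comm[1]) - len(sub_dir[-1]):])
--             if comm[2] == '/':
--                 for dir in temp:
--                     directory.append('/' + dir)
--                 continue
--             for dir in temp: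
--                 directory.append(comm[2] + '/' + dir)
--         elif comm[0] == 'rm':
--             idx = 0
--             while idx < len(directory):
--
--                 if directory[idx][:len(comm[1])] == comm[1]:
--                     del directory[idx]
--                     continue
--                 idx += 1
--     answer = directory
--     answer.sort()
--     return answer
-- ===== SOURCE B (Python) =====
-- # B: keeps the directory list sorted throughout (binary-search insert, contiguous
-- # prefix-ranges for cp/rm, merge of sorted lists), so no final sort is needed.
-- # Return value only: A mutates its `directory` argument in place, B does not.
--
-- def _bisect_left(a, x, lo, hi):
--     while lo < hi:
--         mid = (lo + hi) // 2
--         if a[mid] < x: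
--             lo = mid + 1
--         else:
--             hi = mid
--     return lo
--
--
-- def _scan_hi(a, p, hi):
--     while hi < len(a) and a[hi].startswith(p):
--         hi += 1
--     return hi
--
--
-- def _merge(xs, ys):
--     out = []
--     i = j = 0
--     while i < len(xs) and j < len(ys):
--         if xs[i] <= ys[j]:
--             out.append(xs[i])
--             i += 1
--         else:
--             out.append(ys[j])
--             j += 1
--     return out + xs[i:] + ys[j:]
--
--
-- def solution(directory, command):
--     dirs = sorted(directory)
--     for line in command:
--         parts = line.split()
--         op = parts[0]
--         if op == 'mkdir':
--             name = parts[1]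
--             i = _bisect_left(dirs, name, 0, len(dirs))
--             dirs = dirs[:i] + [name] + dirs[i:]
--         elif op == 'cp':
--             p = parts[1]
--             dst = parts[2]
--             lo = _bisect_left(dirs, p, 0, len(dirs))
--             hi = _scan_hi(dirs, p, lo)
--             cut = len(p) - len(p.split('/')[-1])
--             head = '/' if dst == '/' else dst + '/'
--             new = [head + d[cut:] for d in dirs[lo:hi]]
--             dirs = _merge(dirs, new)
--         elif op == 'rm':
--             p = parts[1]
--             lo = _bisect_left(dirs, p, 0, len(dirs))
--             hi = _scan_hi(dirs, p, lo)
--             dirs = dirs[:lo] + dirs[hi:]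
--     return dirs
-- ===== Notes on version B (the rewrite author's own statement) =====
-- stated objective: alternative
-- what changed: B maintains the directory list sorted at all times (hand-written binary search to locate insert positions and the contiguous prefix-match range for cp/rm, plus a merge of two sorted lists), replacing A's full linear scans with slice comparisons, its in-place rm deletion loop and its final sort.
-- outside the precondition, e.g. on solution([], ['rm']): A returns [], B raises IndexError; on solution(['a'], ['mkdir']): A raises IndexError, B raises IndexError
import Mathlib
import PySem

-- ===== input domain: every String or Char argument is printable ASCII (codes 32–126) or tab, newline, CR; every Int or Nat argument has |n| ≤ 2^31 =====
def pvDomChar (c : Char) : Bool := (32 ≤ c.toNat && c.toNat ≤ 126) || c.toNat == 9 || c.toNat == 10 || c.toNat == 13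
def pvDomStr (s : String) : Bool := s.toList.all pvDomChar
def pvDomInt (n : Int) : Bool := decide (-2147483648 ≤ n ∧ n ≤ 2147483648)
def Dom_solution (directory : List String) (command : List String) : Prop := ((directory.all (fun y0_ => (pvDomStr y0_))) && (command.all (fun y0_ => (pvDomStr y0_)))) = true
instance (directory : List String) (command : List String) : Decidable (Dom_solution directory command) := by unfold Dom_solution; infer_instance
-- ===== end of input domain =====

-- B keeps the directory list sorted throughout (binary-search insert, contiguous
-- prefix ranges for cp/rm, merge of sorted lists) instead of A's full scans plus a
-- final sort; equivalence is about the RETURN value only (A mutates `directory`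
-- in place, B does not).

-- ===== PORT A =====
-- A's `rm` while-loop with in-place `del` walks the list once left to right,
-- deleting matches; ported as the same single traversal by structural recursion.
def rmA (p : String) : List String → List String
  | [] => []
  | d :: ds =>
    if PySem.Str.slice d none (some (PySem.Str.len p)) = p then rmA p ds
    else d :: rmA p ds

def stepA (dirs : List String) (comm : String) : List String :=
  let parts := PySem.Str.split₀ comm
  if PySem.List.pyGetD parts 0 "" = "mkdir" then
    dirs ++ [PySem.List.pyGetD parts 1 ""]
  else if PySem.List.pyGetD parts 0 "" = "cp" then
    let p := PySem.List.pyGetD parts 1 ""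
    let temp := dirs.foldl (fun t d =>
      if PySem.Str.slice d none (some (PySem.Str.len p)) = p then
        t ++ [PySem.Str.slice d (some (PySem.Str.len p - PySem.Str.len (PySem.List.pyGetD ((PySem.Str.split? p "/").getD []) (-1) ""))) none]
      else t) []
    if PySem.List.pyGetD parts 2 "" = "/" then
      temp.foldl (fun acc d => acc ++ [PySem.Str.join "" ["/", d]]) dirs
    else
      temp.foldl (fun acc d => acc ++ [PySem.Str.join "" [PySem.List.pyGetD parts 2 "", "/", d]]) dirs
  else if PySem.List.pyGetD parts 0 "" = "rm" then
    rmA (PySem.List.pyGetD parts 1 "") dirs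
  else dirs

def solution (directory : List String) (command : List String) : List String :=
  PySem.List.sorted (command.foldl stepA directory) (fun x => x) false

-- ===== PORT B =====
-- hand-written bisect_left of Source B (lo/hi while-loop)
def bisectLeftB (a : List String) (x : String) (lo hi : Nat) : Nat :=
  if _h : lo < hi then
    if a.getD ((lo + hi) / 2) "" < x then bisectLeftB a x ((lo + hi) / 2 + 1) hi
    else bisectLeftB a x lo ((lo + hi) / 2)
  else lo
termination_by hi - lo
decreasing_by all_goals omega

-- Source B's _scan_hi: extend hi while the entry still has prefix p
def scanHiB (a : List String) (p : String) (hi : Nat) : Nat :=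
  if hi < a.length then
    if PySem.Str.startswith (a.getD hi "") p then scanHiB a p (hi + 1) else hi
  else hi
termination_by a.length - hi
decreasing_by omega

-- Source B's _merge of two sorted lists (two-pointer loop → structural recursion)
def mergeB : List String → List String → List String
  | [], ys => ys
  | x :: xs, [] => x :: xs
  | x :: xs, y :: ys =>
    if x ≤ y then x :: mergeB xs (y :: ys) else y :: mergeB (x :: xs) ys

def stepB (dirs : List String) (comm : String) : List String :=
  let parts := PySem.Str.split₀ comm
  if PySem.List.pyGetD parts 0 "" = "mkdir" then
    let name := PySem.List.pyGetD parts 1 ""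
    let i := bisectLeftB dirs name 0 dirs.length
    dirs.take i ++ name :: dirs.drop i
  else if PySem.List.pyGetD parts 0 "" = "cp" then
    let p := PySem.List.pyGetD parts 1 ""
    let dst := PySem.List.pyGetD parts 2 ""
    let lo := bisectLeftB dirs p 0 dirs.length
    let hi := scanHiB dirs p lo
    let cut := PySem.Str.len p - PySem.Str.len (PySem.List.pyGetD ((PySem.Str.split? p "/").getD []) (-1) "")
    let head := if dst = "/" then "/" else PySem.Str.join "" [dst, "/"]
    mergeB dirs (((dirs.drop lo).take (hi - lo)).map
      (fun d => PySem.Str.join "" [head, PySem.Str.slice d (some cut) none]))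
  else if PySem.List.pyGetD parts 0 "" = "rm" then
    let p := PySem.List.pyGetD parts 1 ""
    let lo := bisectLeftB dirs p 0 dirs.length
    let hi := scanHiB dirs p lo
    dirs.take lo ++ dirs.drop hi
  else dirs

def solution_alt (directory : List String) (command : List String) : List String :=
  command.foldl stepB (PySem.List.sorted directory (fun x => x) false)

-- ===== PRECONDITION & SPEC =====
-- Pre_ excludes malformed command lines (an empty line, or mkdir/cp/rm missing an
-- operand), on which A raises IndexError; this also excludes an operand-less 'rm',
-- which A tolerates only when the directory list happens to be empty when it runs
-- (well-formedness of a command should not depend on run-time state).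
def Pre_solution (directory : List String) (command : List String) : Prop :=
  ∀ c ∈ command, (PySem.Str.split₀ c ≠ []) ∧
    ((PySem.Str.split₀ c).headD "" = "mkdir" → 2 ≤ (PySem.Str.split₀ c).length) ∧
    ((PySem.Str.split₀ c).headD "" = "cp" → 3 ≤ (PySem.Str.split₀ c).length) ∧
    ((PySem.Str.split₀ c).headD "" = "rm" → 2 ≤ (PySem.Str.split₀ c).length)
instance (directory : List String) (command : List String) : Decidable (Pre_solution directory command) := by
  unfold Pre_solution; infer_instance

def pvWitness_solution : List String × List String :=
  (["a", "a/b"], ["mkdir c", "cp a /", "rm a/b"])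

def Spec_solution (directory : List String) (command : List String) (out : List String) : Prop :=
  out = solution_alt directory command
instance (directory : List String) (command : List String) (out : List String) : Decidable (Spec_solution directory command out) := by
  unfold Spec_solution; infer_instance

-- ===== CLAIM (what is proved, stated in full; the proofs are below) =====
def Claim_equal_solution : Prop := ∀ (directory : List String) (command : List String), Dom_solution directory command → Pre_solution directory command → Spec_solution directory command (solution directory command)

-- ===== LEMMAS AND PROOFS =====

-- the two prefix tests agree: d[:len(p)] == p  ↔  d.startswith(p)
theorem getD_mono (a : List String) (hs : a.Pairwise (· ≤ ·)) {i j : Nat}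
    (hij : i ≤ j) (hj : j < a.length) : a.getD i "" ≤ a.getD j "" := by
  have hi : i < a.length := Nat.lt_of_le_of_lt hij hj
  rw [List.getD_eq_getElem a "" hi, List.getD_eq_getElem a "" hj]
  rcases Nat.eq_or_lt_of_le hij with rfl | hlt
  · exact le_refl _
  · exact List.pairwise_iff_getElem.mp hs i j hi hj hlt

theorem sliceTest_iff_startswith (d p : String) :
    (PySem.Str.slice d none (some (PySem.Str.len p)) = p) ↔ PySem.Str.startswith d p = true := by
  rw [← String.toList_inj, PySem.Str.toList_slice, PySem.Str.startswith_eq,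
    PySem.Chars.startswith_iff, List.prefix_iff_eq_take, PySem.Chars.slice_eq_listSlice,
    PySem.Str.len_eq, PySem.List.slice_to_natCast]
  exact eq_comm

-- a prefix is ≤ in Python's string order
theorem not_cons_le_nil (c : Char) (l : List Char) : ¬ (c :: l ≤ ([] : List Char)) := by
  intro h
  rcases le_iff_lt_or_eq.mp h with hlt | heq
  · exact nomatch (show List.Lex (· < ·) (c :: l) [] from hlt)
  · simp at heq

theorem cons_le_cons_iff' (a b : Char) (l m : List Char) :
    a :: l ≤ b :: m ↔ a < b ∨ (a = b ∧ l ≤ m) := by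
  constructor
  · intro h
    rcases le_iff_lt_or_eq.mp h with hlt | heq
    · have hx : List.Lex (· < ·) (a :: l) (b :: m) := hlt
      cases hx with
      | cons h' => exact Or.inr ⟨rfl, le_of_lt (show l < m from h')⟩
      | rel h' => exact Or.inl h'
    · injection heq with h1 h2
      exact Or.inr ⟨h1, by rw [h2]⟩
  · intro h
    rcases h with hlt | ⟨rfl, hle⟩
    · exact le_of_lt (show (a :: l) < (b :: m) from List.Lex.rel hlt)
    · exact List.cons_le_cons a hle

theorem le_append_right (p t : List Char) : p ≤ p ++ t := by
  induction p with
  | nil =>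
    cases t with
    | nil => simp
    | cons c ts => exact le_of_lt (show ([] : List Char) < c :: ts from List.Lex.nil)
  | cons c p' ih => exact List.cons_le_cons c ih

theorem append_le_cancel (c s t : List Char) (h : c ++ s ≤ c ++ t) : s ≤ t := by
  by_contra hn
  exact absurd h (not_le.mpr (show c ++ t < c ++ s from
    List.Lex.append_left (· < ·) (show List.Lex (· < ·) t s from not_le.mp hn) c))

theorem append_le_append_left (c s t : List Char) (h : s ≤ t) : c ++ s ≤ c ++ t := by
  rcases le_iff_lt_or_eq.mp h with hlt | rfl
  · exact le_of_lt (show c ++ s < c ++ t from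
      List.Lex.append_left (· < ·) (show List.Lex (· < ·) s t from hlt) c)
  · exact le_refl _

theorem le_of_startswith (p s : String) (h : PySem.Str.startswith s p = true) : p ≤ s := by
  rw [PySem.Str.startswith_eq, PySem.Chars.startswith_iff] at h
  obtain ⟨t, ht⟩ := h
  exact String.le_iff_toList_le.mpr (ht ▸ le_append_right p.toList t)

-- strings with prefix p form an interval: p ≤ a ≤ b and b startswith p → a startswith p
theorem prefix_of_between : ∀ (p a b : List Char), p ≤ a → a ≤ b → p <+: b → p <+: a := by
  intro p
  induction p with
  | nil => intro a b _ _ _; exact List.nil_prefix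
  | cons c p' ih =>
    intro a b hpa hab hb
    obtain ⟨t, rfl⟩ := hb
    cases a with
    | nil => exact absurd hpa (not_cons_le_nil c p')
    | cons a0 a' =>
      rcases (cons_le_cons_iff' c a0 p' a').mp hpa with h | ⟨rfl, hpa'⟩
      · rcases (cons_le_cons_iff' a0 c a' (p' ++ t)).mp hab with h2 | ⟨rfl, hab'⟩
        · exact absurd h2 (lt_asymm h)
        · exact absurd h (lt_irrefl _)
      · rcases (cons_le_cons_iff' _ _ a' (p' ++ t)).mp hab with h2 | ⟨heq, hab'⟩
        · exact absurd h2 (lt_irrefl _)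
        · exact List.cons_prefix_cons.mpr ⟨rfl, ih a' (p' ++ t) hpa' hab' ⟨t, rfl⟩⟩

theorem startswith_of_between (p a b : String) (hpa : p ≤ a) (hab : a ≤ b)
    (hb : PySem.Str.startswith b p = true) : PySem.Str.startswith a p = true := by
  rw [PySem.Str.startswith_eq, PySem.Chars.startswith_iff] at hb ⊢
  exact prefix_of_between p.toList a.toList b.toList (String.le_iff_toList_le.mp hpa)
    (String.le_iff_toList_le.mp hab) hb

theorem bisectLeftB_spec_aux (a : List String) (x : String) (hs : a.Pairwise (· ≤ ·)) :
    ∀ (n lo hi : Nat), hi - lo ≤ n → lo ≤ hi → hi ≤ a.length →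
      lo ≤ bisectLeftB a x lo hi ∧ bisectLeftB a x lo hi ≤ hi ∧
      (∀ j, lo ≤ j → j < bisectLeftB a x lo hi → a.getD j "" < x) ∧
      (∀ j, bisectLeftB a x lo hi ≤ j → j < hi → x ≤ a.getD j "") := by
  intro n
  induction n with
  | zero =>
    intro lo hi hn hlh hhi
    have heq : lo = hi := by omega
    subst heq
    rw [bisectLeftB, dif_neg (lt_irrefl lo)]
    exact ⟨le_refl _, le_refl _,
      fun j h1 h2 => absurd (Nat.lt_of_le_of_lt h1 h2) (Nat.lt_irrefl _),
      fun j h1 h2 => absurd (Nat.lt_of_le_of_lt h1 h2) (Nat.lt_irrefl _)⟩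
  | succ n ih =>
    intro lo hi hn hlh hhi
    rw [bisectLeftB]
    by_cases h : lo < hi
    · rw [dif_pos h]
      by_cases hc : a.getD ((lo + hi) / 2) "" < x
      · rw [if_pos hc]
        obtain ⟨r1, r2, r3, r4⟩ := ih ((lo + hi) / 2 + 1) hi (by omega) (by omega) hhi
        refine ⟨by omega, r2, ?_, r4⟩
        intro j hj1 hj2
        by_cases hjm : (lo + hi) / 2 + 1 ≤ j
        · exact r3 j hjm hj2
        · exact lt_of_le_of_lt (getD_mono a hs (show j ≤ (lo + hi) / 2 by omega) (by omega)) hc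
      · rw [if_neg hc]
        obtain ⟨r1, r2, r3, r4⟩ := ih lo ((lo + hi) / 2) (by omega) (by omega) (by omega)
        refine ⟨r1, by omega, r3, ?_⟩
        intro j hj1 hj2
        by_cases hjm : j < (lo + hi) / 2
        · exact r4 j hj1 hjm
        · exact (not_lt.mp hc).trans (getD_mono a hs (by omega) (by omega))
    · rw [dif_neg h]
      exact ⟨le_refl _, by omega,
        fun j h1 h2 => absurd (Nat.lt_of_le_of_lt h1 h2) (Nat.lt_irrefl _),
        fun j h1 h2 => absurd (Nat.lt_of_lt_of_le h2 (Nat.le_trans (Nat.le_of_not_lt h) h1)) (Nat.lt_irrefl _)⟩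

theorem bisectLeftB_spec (a : List String) (x : String) (lo hi : Nat)
    (hlh : lo ≤ hi) (hhi : hi ≤ a.length) (hs : a.Pairwise (· ≤ ·)) :
    lo ≤ bisectLeftB a x lo hi ∧ bisectLeftB a x lo hi ≤ hi ∧
      (∀ j, lo ≤ j → j < bisectLeftB a x lo hi → a.getD j "" < x) ∧
      (∀ j, bisectLeftB a x lo hi ≤ j → j < hi → x ≤ a.getD j "") :=
  bisectLeftB_spec_aux a x hs (hi - lo) lo hi (le_refl _) hlh hhi

theorem scanHiB_spec_aux (a : List String) (p : String) :
    ∀ (n lo : Nat), a.length - lo ≤ n → lo ≤ a.length →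
      lo ≤ scanHiB a p lo ∧ scanHiB a p lo ≤ a.length ∧
      (∀ j, lo ≤ j → j < scanHiB a p lo → PySem.Str.startswith (a.getD j "") p = true) ∧
      (scanHiB a p lo < a.length → ¬ PySem.Str.startswith (a.getD (scanHiB a p lo) "") p = true) := by
  intro n
  induction n with
  | zero =>
    intro lo hn hlo
    have hx : ¬ lo < a.length := by omega
    rw [scanHiB, if_neg hx]
    exact ⟨le_refl _, hlo,
      fun j h1 h2 => absurd (Nat.lt_of_le_of_lt h1 h2) (Nat.lt_irrefl _),
      fun hlt => absurd hlt hx⟩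
  | succ n ih =>
    intro lo hn hlo
    rw [scanHiB]
    by_cases h : lo < a.length
    · rw [if_pos h]
      by_cases hsw : PySem.Str.startswith (a.getD lo "") p = true
      · rw [if_pos hsw]
        obtain ⟨s1, s2, s3, s4⟩ := ih (lo + 1) (by omega) (by omega)
        refine ⟨by omega, s2, ?_, s4⟩
        intro j h1 h2
        rcases Nat.eq_or_lt_of_le h1 with rfl | hlt
        · exact hsw
        · exact s3 j (by omega) h2
      · rw [if_neg hsw]
        exact ⟨le_refl _, le_of_lt h,
          fun j h1 h2 => absurd (Nat.lt_of_le_of_lt h1 h2) (Nat.lt_irrefl _),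
          fun _ => hsw⟩
    · rw [if_neg h]
      exact ⟨le_refl _, by omega,
        fun j h1 h2 => absurd (Nat.lt_of_le_of_lt h1 h2) (Nat.lt_irrefl _),
        fun hlt => absurd hlt h⟩

theorem scanHiB_spec (a : List String) (p : String) (lo : Nat) (hlo : lo ≤ a.length) :
    lo ≤ scanHiB a p lo ∧ scanHiB a p lo ≤ a.length ∧
      (∀ j, lo ≤ j → j < scanHiB a p lo → PySem.Str.startswith (a.getD j "") p = true) ∧
      (scanHiB a p lo < a.length → ¬ PySem.Str.startswith (a.getD (scanHiB a p lo) "") p = true) :=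
  scanHiB_spec_aux a p (a.length - lo) lo (le_refl _) hlo

theorem mergeB_perm (xs ys : List String) : (mergeB xs ys).Perm (xs ++ ys) := by
  fun_induction mergeB xs ys with
  | case1 ys => simp
  | case2 x xs => simp
  | case3 x xs y ys h ih => exact ih.cons x
  | case4 x xs y ys h ih => exact (ih.cons y).trans List.perm_middle.symm

theorem mergeB_pairwise (xs ys : List String)
    (hx : xs.Pairwise (· ≤ ·)) (hy : ys.Pairwise (· ≤ ·)) :
    (mergeB xs ys).Pairwise (· ≤ ·) := by
  fun_induction mergeB xs ys with
  | case1 ys => exact hy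
  | case2 x xs => exact hx
  | case3 x xs y ys h ih =>
    rw [List.pairwise_cons] at hx ⊢
    refine ⟨fun z hz => ?_, ih hx.2 hy⟩
    rcases List.mem_append.mp (((mergeB_perm _ _).mem_iff).mp hz) with hzx | hzy
    · exact hx.1 z hzx
    · rcases List.mem_cons.mp hzy with rfl | hzys
      · exact h
      · exact h.trans ((List.pairwise_cons.mp hy).1 z hzys)
  | case4 x xs y ys h ih =>
    rw [List.pairwise_cons] at hy ⊢
    have hyx : y ≤ x := le_of_lt (lt_of_not_ge h)
    refine ⟨fun z hz => ?_, ih hx hy.2⟩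
    rcases List.mem_append.mp (((mergeB_perm _ _).mem_iff).mp hz) with hzx | hzy
    · rcases List.mem_cons.mp hzx with rfl | hzxs
      · exact hyx
      · exact hyx.trans ((List.pairwise_cons.mp hx).1 z hzxs)
    · exact hy.1 z hzy

theorem rmA_eq_filter (p : String) (ds : List String) :
    rmA p ds = ds.filter (fun d => !PySem.Str.startswith d p) := by
  induction ds with
  | nil => rfl
  | cons d ds ih =>
    rw [rmA, List.filter_cons]
    by_cases h : PySem.Str.startswith d p = true
    · rw [if_pos ((sliceTest_iff_startswith d p).mpr h), ih]
      rw [PySem.Str.startswith_eq] at h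
      simp [h]
    · rw [if_neg (fun hc => h ((sliceTest_iff_startswith d p).mp hc)), ih]
      rw [PySem.Str.startswith_eq] at h
      simp [h]

-- the matched block of a sorted list is exactly the contiguous range [lo, hi)
theorem range_eq_filter (bs : List String) (p : String) (hs : bs.Pairwise (· ≤ ·)) :
    ((bs.drop (bisectLeftB bs p 0 bs.length)).take
        (scanHiB bs p (bisectLeftB bs p 0 bs.length) - bisectLeftB bs p 0 bs.length)) =
      bs.filter (fun d => PySem.Str.startswith d p) ∧
    (bs.take (bisectLeftB bs p 0 bs.length) ++
        bs.drop (scanHiB bs p (bisectLeftB bs p 0 bs.length))) =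
      bs.filter (fun d => !PySem.Str.startswith d p) := by
  obtain ⟨b1, b2, b3, b4⟩ := bisectLeftB_spec bs p 0 bs.length (Nat.zero_le _) (le_refl _) hs
  set lo := bisectLeftB bs p 0 bs.length with hlodef
  obtain ⟨s1, s2, s3, s4⟩ := scanHiB_spec bs p lo b2
  set hi := scanHiB bs p lo with hhidef
  have hA : ∀ d ∈ bs.take lo, PySem.Str.startswith d p = false := by
    intro d hd
    obtain ⟨j, hj, hdj⟩ := List.getElem_of_mem hd
    have hjlo : j < lo := by
      have := hj; simp only [List.length_take] at this; omega
    have hjlen : j < bs.length := by omega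
    have hdeq : d = bs[j] := by rw [← hdj, List.getElem_take]
    have hlt : bs[j] < p := by
      have := b3 j (Nat.zero_le _) hjlo
      rwa [List.getD_eq_getElem bs "" hjlen] at this
    by_contra hne
    have htrue : PySem.Str.startswith d p = true := by
      cases hx : PySem.Str.startswith d p
      · exact absurd hx hne
      · rfl
    exact absurd (le_of_startswith p d htrue) (not_le.mpr (hdeq ▸ hlt))
  have hB : ∀ d ∈ (bs.drop lo).take (hi - lo), PySem.Str.startswith d p = true := by
    intro d hd
    obtain ⟨k, hk, hdk⟩ := List.getElem_of_mem hd
    have hklen : lo + k < bs.length := by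
      have := hk; simp only [List.length_take, List.length_drop] at this; omega
    have hkhi : lo + k < hi := by
      have := hk; simp only [List.length_take, List.length_drop] at this; omega
    have hdeq : d = bs[lo + k] := by rw [← hdk, List.getElem_take, List.getElem_drop]
    rw [hdeq]
    have := s3 (lo + k) (by omega) hkhi
    rwa [List.getD_eq_getElem bs "" hklen] at this
  have hC : ∀ d ∈ bs.drop hi, PySem.Str.startswith d p = false := by
    intro d hd
    obtain ⟨k, hk, hdk⟩ := List.getElem_of_mem hd
    have hklen : hi + k < bs.length := by
      have := hk; simp only [List.length_drop] at this; omega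
    have hhilen : hi < bs.length := by omega
    have hdeq : d = bs[hi + k] := by rw [← hdk, List.getElem_drop]
    by_contra hne
    have htrue : PySem.Str.startswith d p = true := by
      cases hx : PySem.Str.startswith d p
      · exact absurd hx hne
      · rfl
    have hple : p ≤ bs[hi] := by
      have := b4 hi s1 hhilen
      rwa [List.getD_eq_getElem bs "" hhilen] at this
    have hmono : bs[hi] ≤ bs[hi + k] := by
      have := getD_mono bs hs (show hi ≤ hi + k by omega) hklen
      rwa [List.getD_eq_getElem bs "" hhilen, List.getD_eq_getElem bs "" hklen] at this
    exact s4 hhilen (by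
      rw [List.getD_eq_getElem bs "" hhilen]
      exact startswith_of_between p bs[hi] (bs[hi + k]) hple hmono (hdeq ▸ htrue))
  simp only [PySem.Str.startswith_eq] at hA hB hC
  have hdecomp2 : (bs.drop lo).drop (hi - lo) = bs.drop hi := by
    rw [List.drop_drop]; congr 1; omega
  have hdecomp : bs = bs.take lo ++ ((bs.drop lo).take (hi - lo) ++ bs.drop hi) := by
    conv_lhs => rw [← List.take_append_drop lo bs]
    congr 1
    conv_lhs => rw [← List.take_append_drop (hi - lo) (bs.drop lo)]
    rw [hdecomp2]
  constructor
  · conv_rhs => rw [hdecomp]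
    rw [List.filter_append, List.filter_append,
        List.filter_eq_nil_iff.mpr (by intro d hd; simp [hA d hd]),
        List.filter_eq_self.mpr (by intro d hd; simp [hB d hd]),
        List.filter_eq_nil_iff.mpr (by intro d hd; simp [hC d hd])]
    simp
  · conv_rhs => rw [hdecomp]
    rw [List.filter_append, List.filter_append,
        List.filter_eq_self.mpr (by intro d hd; simp [hA d hd]),
        List.filter_eq_nil_iff.mpr (by intro d hd; simp [hB d hd]),
        List.filter_eq_self.mpr (by intro d hd; simp [hC d hd])]
    simp

theorem splitOn_go_bound (sep : List Char) :
    ∀ (fuel : Nat) (l cur : List Char) (acc : List (List Char)),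
      PySem.Chars.splitOn.go sep fuel l cur acc ≠ [] ∧
      ∀ q ∈ PySem.Chars.splitOn.go sep fuel l cur acc,
        q.length ≤ cur.length + l.length ∨ q ∈ acc := by
  intro fuel
  induction fuel with
  | zero =>
    intro l cur acc
    rw [PySem.Chars.splitOn.go]
    constructor
    · simp
    · intro q hq
      simp only [List.mem_reverse, List.mem_cons] at hq
      rcases hq with rfl | hq
      · left; simp
      · right; exact hq
  | succ fuel ih =>
    intro l cur acc
    cases l with
    | nil =>
      rw [PySem.Chars.splitOn.go]
      · constructor
        · simp
        · intro q hq
          simp only [List.mem_reverse, List.mem_cons] at hq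
          rcases hq with rfl | hq
          · left; simp
          · right; exact hq
      · omega
    | cons c rest =>
      rw [PySem.Chars.splitOn.go]
      by_cases hpre : sep.isPrefixOf (c :: rest) = true
      · rw [if_pos hpre]
        obtain ⟨hne, hmem⟩ := ih (List.drop sep.length (c :: rest)) [] (cur.reverse :: acc)
        refine ⟨hne, fun q hq => ?_⟩
        rcases hmem q hq with hlen | hacc
        · left
          simp only [List.length_nil, List.length_drop, List.length_cons] at hlen ⊢
          omega
        · rcases List.mem_cons.mp hacc with rfl | h
          · left; simp
          · right; exact h
      · rw [if_neg hpre]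
        obtain ⟨hne, hmem⟩ := ih rest (c :: cur) acc
        refine ⟨hne, fun q hq => ?_⟩
        rcases hmem q hq with hlen | hacc
        · left
          simp only [List.length_cons] at hlen ⊢
          omega
        · right; exact hacc

-- 0 ≤ cut ≤ len p (the last '/'-piece of p is no longer than p)
theorem cut_bounds (p : String) :
    0 ≤ PySem.Str.len p - PySem.Str.len (PySem.List.pyGetD ((PySem.Str.split? p "/").getD []) (-1) "") ∧
      (PySem.Str.len p - PySem.Str.len (PySem.List.pyGetD ((PySem.Str.split? p "/").getD []) (-1) "")).toNat ≤ p.toList.length := by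
  have hsplit : PySem.Str.split? p "/" =
      some ((PySem.Chars.splitOn p.toList ['/']).map String.ofList) := by
    simp [PySem.Str.split?, PySem.Chars.split?]
  obtain ⟨hne, hmem⟩ := splitOn_go_bound ['/'] (p.toList.length + 1) p.toList [] []
  have hgo : PySem.Chars.splitOn p.toList ['/'] =
      PySem.Chars.splitOn.go ['/'] (p.toList.length + 1) p.toList [] [] := rfl
  have hne' : (PySem.Chars.splitOn p.toList ['/']).map String.ofList ≠ [] := by
    rw [hgo]; simpa using hne
  rw [hsplit]
  simp only [Option.getD_some]
  rw [PySem.List.pyGetD_neg_one _ "" hne']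
  obtain ⟨q, hqss, hq⟩ := List.mem_map.mp (List.getLast_mem hne')
  have hqlen : q.length ≤ p.toList.length := by
    rw [hgo] at hqss
    rcases hmem q hqss with h | h
    · simpa using h
    · simp at h
  rw [← hq, PySem.Str.len_eq, PySem.Str.len_eq, String.toList_ofList]
  constructor <;> omega

-- the copy transform is monotone on strings sharing the prefix p
theorem copy_mono (p head : String) (cut : Int) (h0 : 0 ≤ cut) (hcut : cut.toNat ≤ p.toList.length)
    (a b : String) (ha : PySem.Str.startswith a p = true) (hb : PySem.Str.startswith b p = true)
    (hab : a ≤ b) :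
    PySem.Str.join "" [head, PySem.Str.slice a (some cut) none] ≤
      PySem.Str.join "" [head, PySem.Str.slice b (some cut) none] := by
  rw [PySem.Str.startswith_eq, PySem.Chars.startswith_iff] at ha hb
  obtain ⟨ta, hta⟩ := ha
  obtain ⟨tb, htb⟩ := hb
  rw [String.le_iff_toList_le] at hab ⊢
  rw [PySem.Str.toList_join, PySem.Str.toList_join]
  have hjoin : ∀ u v : List Char, PySem.Chars.join ("".toList) [u, v] = u ++ v := by
    intro u v
    rw [show ("" : String).toList = [] from rfl, PySem.Chars.join_cons_cons,
      PySem.Chars.join_singleton]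
    simp
  simp only [List.map_cons, List.map_nil, PySem.Str.toList_slice,
    PySem.Chars.slice_eq_listSlice, hjoin]
  rw [← hta, ← htb] at hab ⊢
  rw [PySem.List.slice_from (p.toList ++ ta) h0, PySem.List.slice_from (p.toList ++ tb) h0,
    List.drop_append_of_le_length hcut, List.drop_append_of_le_length hcut]
  exact append_le_append_left _ _ _
    (append_le_append_left _ _ _ (append_le_cancel p.toList ta tb hab))

theorem join_join (a b c : String) :
    PySem.Str.join "" [PySem.Str.join "" [a, b], c] = PySem.Str.join "" [a, b, c] := by
  rw [← String.toList_inj]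
  simp [PySem.Str.toList_join, PySem.Chars.join_cons_cons, PySem.Chars.join_singleton]

theorem insert_pairwise (bs : List String) (x : String) (i : Nat)
    (hi : i ≤ bs.length) (hs : bs.Pairwise (· ≤ ·))
    (hlow : ∀ j, j < i → (hj : j < bs.length) → bs[j] < x)
    (hhigh : ∀ j, i ≤ j → (hj : j < bs.length) → x ≤ bs[j]) :
    (bs.take i ++ x :: bs.drop i).Pairwise (· ≤ ·) := by
  rw [List.pairwise_append]
  refine ⟨hs.sublist (List.take_sublist i bs), ?_, ?_⟩
  · rw [List.pairwise_cons]
    refine ⟨fun z hz => ?_, hs.sublist (List.drop_sublist i bs)⟩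
    obtain ⟨k, hk, hkz⟩ := List.getElem_of_mem hz
    have hklen : i + k < bs.length := by
      have := hk; simp only [List.length_drop] at this; omega
    rw [← hkz, List.getElem_drop]
    exact hhigh (i + k) (by omega) hklen
  · intro u hu z hz
    obtain ⟨j, hj, hju⟩ := List.getElem_of_mem hu
    have hji : j < i := by
      have := hj; simp only [List.length_take] at this; omega
    have hjlen : j < bs.length := by omega
    have hueq : u = bs[j] := by rw [← hju, List.getElem_take]
    rcases List.mem_cons.mp hz with rfl | hz'
    · exact le_of_lt (hueq ▸ hlow j hji hjlen)
    · obtain ⟨k, hk, hkz⟩ := List.getElem_of_mem hz'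
      have hklen : i + k < bs.length := by
        have := hk; simp only [List.length_drop] at this; omega
      rw [hueq, ← hkz, List.getElem_drop]
      exact List.pairwise_iff_getElem.mp hs j (i + k) hjlen hklen (by omega)

set_option maxHeartbeats 1000000 in
theorem stepB_stepA (as bs : List String) (c : String)
    (hperm : bs.Perm as) (hs : bs.Pairwise (· ≤ ·)) :
    (stepB bs c).Perm (stepA as c) ∧ (stepB bs c).Pairwise (· ≤ ·) := by
  simp only [stepA, stepB]
  by_cases h1 : PySem.List.pyGetD (PySem.Str.split₀ c) 0 "" = "mkdir"
  · simp only [if_pos h1]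
    set name := PySem.List.pyGetD (PySem.Str.split₀ c) 1 "" with hname
    obtain ⟨b1, b2, b3, b4⟩ :=
      bisectLeftB_spec bs name 0 bs.length (Nat.zero_le _) (le_refl _) hs
    set i := bisectLeftB bs name 0 bs.length with hidef
    constructor
    · have h2 : (bs.take i ++ name :: bs.drop i).Perm (name :: bs) := by
        have := List.perm_middle (a := name) (l₁ := bs.take i) (l₂ := bs.drop i)
        rwa [List.take_append_drop] at this
      exact h2.trans ((hperm.cons name).trans (List.perm_append_singleton name as).symm)
    · refine insert_pairwise bs name i b2 hs (fun j hj hjlen => ?_) (fun j hj hjlen => ?_)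
      · have := b3 j (Nat.zero_le _) hj
        rwa [List.getD_eq_getElem bs "" hjlen] at this
      · have := b4 j hj hjlen
        rwa [List.getD_eq_getElem bs "" hjlen] at this
  · simp only [if_neg h1]
    by_cases h2 : PySem.List.pyGetD (PySem.Str.split₀ c) 0 "" = "cp"
    · simp only [if_pos h2]
      set p := PySem.List.pyGetD (PySem.Str.split₀ c) 1 "" with hp
      set dst := PySem.List.pyGetD (PySem.Str.split₀ c) 2 "" with hdst
      set cut := PySem.Str.len p -
        PySem.Str.len (PySem.List.pyGetD ((PySem.Str.split? p "/").getD []) (-1) "") with hcutdef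
      have hcb := cut_bounds p
      rw [← hcutdef] at hcb
      clear_value cut
      clear_value dst
      clear_value p
      rw [PySem.List.foldl_append_ite
        (fun d => PySem.Str.slice d none (some (PySem.Str.len p)) = p)
        (fun d => PySem.Str.slice d (some cut) none) as []]
      rw [List.nil_append, PySem.List.foldl_append_singleton_eq_map,
        PySem.List.foldl_append_singleton_eq_map, List.map_map]
      have htest : ∀ d : String,
          (decide (PySem.Str.slice d none (some (PySem.Str.len p)) = p)) =
            PySem.Str.startswith d p := by
        intro d
        rcases hx : PySem.Str.startswith d p with _ | _
        · exact decide_eq_false fun hc => by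
            have hcc := (sliceTest_iff_startswith d p).mp hc
            rw [hcc] at hx
            simp at hx
        · exact decide_eq_true ((sliceTest_iff_startswith d p).mpr hx)
      rw [List.filter_congr (fun d _ => htest d)]
      rw [(range_eq_filter bs p hs).1]
      by_cases h3 : dst = "/"
      · simp only [if_pos h3]
        constructor
        · exact (mergeB_perm _ _).trans
            (hperm.append ((hperm.filter (fun d => PySem.Str.startswith d p)).map
              (fun d => PySem.Str.join "" ["/", PySem.Str.slice d (some cut) none])))
        · refine mergeB_pairwise _ _ hs ?_
          rw [List.pairwise_map]
          refine (List.Pairwise.filter _ hs).imp_of_mem ?_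
          intro u v hu hv huv
          exact copy_mono p "/" cut hcb.1 hcb.2 u v
            ((List.mem_filter.mp hu).2) ((List.mem_filter.mp hv).2) huv
      · simp only [if_neg h3]
        rw [List.map_map]
        simp only [Function.comp_def]
        have hfun : (fun d => PySem.Str.join ""
              [PySem.Str.join "" [dst, "/"], PySem.Str.slice d (some cut) none]) =
            (fun d => PySem.Str.join "" [dst, "/", PySem.Str.slice d (some cut) none]) :=
          funext fun d => join_join dst "/" (PySem.Str.slice d (some cut) none)
        rw [hfun]
        constructor
        · exact (mergeB_perm _ _).trans
            (hperm.append ((hperm.filter (fun d => PySem.Str.startswith d p)).map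
              (fun d => PySem.Str.join "" [dst, "/", PySem.Str.slice d (some cut) none])))
        · refine mergeB_pairwise _ _ hs ?_
          rw [List.pairwise_map]
          refine (List.Pairwise.filter _ hs).imp_of_mem ?_
          intro u v hu hv huv
          have h := copy_mono p (PySem.Str.join "" [dst, "/"]) cut hcb.1 hcb.2 u v
            ((List.mem_filter.mp hu).2) ((List.mem_filter.mp hv).2) huv
          rwa [join_join, join_join] at h
    · simp only [if_neg h2]
      by_cases h3 : PySem.List.pyGetD (PySem.Str.split₀ c) 0 "" = "rm"
      · simp only [if_pos h3]
        rw [(range_eq_filter bs (PySem.List.pyGetD (PySem.Str.split₀ c) 1 "") hs).2,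
          rmA_eq_filter]
        exact ⟨hperm.filter _, List.Pairwise.filter _ hs⟩
      · simp only [if_neg h3]
        exact ⟨hperm, hs⟩

theorem fold_inv (cmds : List String) (as bs : List String)
    (hperm : bs.Perm as) (hs : bs.Pairwise (· ≤ ·)) :
    (cmds.foldl stepB bs).Perm (cmds.foldl stepA as) ∧
      (cmds.foldl stepB bs).Pairwise (· ≤ ·) := by
  induction cmds generalizing as bs with
  | nil => exact ⟨hperm, hs⟩
  | cons c cs ih =>
    obtain ⟨h1, h2⟩ := stepB_stepA as bs c hperm hs
    exact ih (stepA as c) (stepB bs c) h1 h2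

-- ===== VERDICT (by name: the statement is the Claim_ definition above) =====
theorem solution_spec : Claim_equal_solution := by
  intro directory command _ _
  unfold Spec_solution solution solution_alt
  obtain ⟨h1, h2⟩ := fold_inv command directory (PySem.List.sorted directory (fun x => x) false)
    (PySem.List.sorted_perm directory (fun x => x) false)
    (PySem.List.sorted_pairwise directory (fun x => x))
  exact PySem.List.sorted_id_eq_of_perm_of_pairwise _ _ h1 h2
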